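-- pv_equiv track=rewrite | github.com/Sapf3ar/sadm-misis-25 | task3/task.py | merge_equivalences
-- ===== SOURCE A (Python) =====
-- def merge_equivalences(eq_star, items):
--     n = len(items)
--     parent = list(range(n))
--
--     def find(x: int) -> int:
--         while parent[x] != x:
--             parent[x] = parent[parent[x]]
--             x = parent[x]
--         return x
--
--     def unite(a: int, b: int) -> None:
--         ra, rb = find(a), find(b)
--         if ra != rb:
--             parent[rb] = ra
--
--     for i in range(n):
--         for j in range(i + 1, n):
--             if eq_star[i][j] and eq_star[j][i]:
--                 unite(i, j)
--
--     comps = {}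
--     for i in range(n):
--         r = find(i)
--         comps.setdefault(r, []).append(items[i])
--
--     groups = [sorted(v) for v in comps.values()]
--     groups.sort(key=lambda g: g[0])
--     return groups
-- ===== SOURCE B (Python) =====
-- def merge_equivalences(eq_star, items):
--     n = len(items)
--     # direct label table instead of a parent forest: merging relabels in one pass
--     labels = list(range(n))
--     for i in range(n):
--         for j in range(i + 1, n):
--             if eq_star[i][j] and eq_star[j][i]:
--                 a, b = labels[i], labels[j]
--                 if a != b:
--                     labels = [a if l == b else l for l in labels]
--     comps = {}
--     for idx in range(n):
--         comps.setdefault(labels[idx], []).append(items[idx])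
--     groups = [sorted(v) for v in comps.values()]
--     groups.sort(key=lambda g: g[0])
--     return groups
-- ===== Notes on version B (the rewrite author's own statement) =====
-- stated objective: alternative
-- what changed: A's union-find (parent forest with path-halving find and unite) is replaced by a flat label table: each merge relabels every occurrence of one component label in a single comprehension pass, so find/unite and the parent array disappear.
import Mathlib
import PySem

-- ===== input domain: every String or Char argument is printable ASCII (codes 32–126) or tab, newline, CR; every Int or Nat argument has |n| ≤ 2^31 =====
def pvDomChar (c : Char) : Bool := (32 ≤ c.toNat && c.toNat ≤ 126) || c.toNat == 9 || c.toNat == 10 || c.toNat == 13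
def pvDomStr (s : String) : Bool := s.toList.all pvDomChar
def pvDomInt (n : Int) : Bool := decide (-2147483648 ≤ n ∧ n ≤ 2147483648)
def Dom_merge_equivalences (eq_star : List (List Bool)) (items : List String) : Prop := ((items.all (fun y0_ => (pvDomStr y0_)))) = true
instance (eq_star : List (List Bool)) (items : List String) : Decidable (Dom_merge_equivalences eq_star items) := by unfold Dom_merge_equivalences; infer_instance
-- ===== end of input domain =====

-- B replaces A's union-find forest (find with path halving + unite) by a direct label
-- table relabelled in one pass per merge: an alternative algorithm, no speed claim.

-- ===== PORT A =====
-- find(x) with path halving; the while loop is guarded by fuel (any fuel ≥ len(parent)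
-- suffices, proved in findA_spec below); matrix reads use getD, in range under Pre_.
def findA (p : List Nat) (x : Nat) : Nat → List Nat × Nat
  | 0 => (p, x)
  | fuel+1 =>
    let px := p.getD x x
    if px = x then (p, x)
    else
      let p' := p.set x (p.getD px px)
      findA p' (p'.getD x x) fuel

def uniteA (p : List Nat) (a b : Nat) : List Nat :=
  let r1 := findA p a (p.length + 1)
  let r2 := findA r1.1 b (r1.1.length + 1)
  if r1.2 ≠ r2.2 then r2.1.set r2.2 r1.2 else r2.1

def merge_equivalences (eq_star : List (List Bool)) (items : List String) : List (List String) :=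
  let n := items.length
  let parent0 : List Nat := List.range n
  let parent := (List.range n).foldl (fun p i =>
      (List.range' (i+1) (n - (i+1))).foldl (fun p j =>
        if (eq_star.getD i []).getD j false && (eq_star.getD j []).getD i false
        then uniteA p i j else p) p) parent0
  let st := (List.range n).foldl
      (fun (st : List Nat × PySem.Dict Nat (List String)) i =>
        let fr := findA st.1 i (st.1.length + 1)
        (fr.1, st.2.modify fr.2 [] (· ++ [items.getD i ""])))
      (parent, PySem.Dict.empty)
  let groups := st.2.values.map (fun v => PySem.List.sorted v (fun x => x) false)
  PySem.List.sorted groups (fun g => g.getD 0 "") false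

-- ===== PORT B =====
def merge_equivalences_alt (eq_star : List (List Bool)) (items : List String) : List (List String) :=
  let n := items.length
  let labels0 : List Nat := List.range n
  let labels := (List.range n).foldl (fun ls i =>
      (List.range' (i+1) (n - (i+1))).foldl (fun ls j =>
        if (eq_star.getD i []).getD j false && (eq_star.getD j []).getD i false
        then
          let a := ls.getD i 0
          let b := ls.getD j 0
          if a ≠ b then ls.map (fun l => if l = b then a else l) else ls
        else ls) ls) labels0
  let comps := (List.range n).foldl
      (fun (d : PySem.Dict Nat (List String)) idx =>
        d.modify (labels.getD idx 0) [] (· ++ [items.getD idx ""]))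
      PySem.Dict.empty
  let groups := comps.values.map (fun v => PySem.List.sorted v (fun x => x) false)
  PySem.List.sorted groups (fun g => g.getD 0 "") false

-- ===== PRECONDITION & SPEC =====
-- Pre_ is exactly the domain on which the Python A returns normally: every matrix read
-- A performs (eq_star[i][j] for i<j<n, and eq_star[j][i] only when the former is True,
-- by `and` short-circuit) is in range; outside it A raises IndexError.
def Pre_merge_equivalences (eq_star : List (List Bool)) (items : List String) : Prop :=
  ∀ i ∈ List.range items.length, ∀ j ∈ List.range items.length, i < j →
    (i < eq_star.length ∧ j < (eq_star.getD i []).length ∧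
      ((eq_star.getD i []).getD j false = true →
        j < eq_star.length ∧ i < (eq_star.getD j []).length))
instance (eq_star : List (List Bool)) (items : List String) : Decidable (Pre_merge_equivalences eq_star items) := by unfold Pre_merge_equivalences; infer_instance

def pvWitness_merge_equivalences : List (List Bool) × List String :=
  ([[true, true, false], [true, true, false], [false, false, true]], ["b", "a", "c"])

def Spec_merge_equivalences (eq_star : List (List Bool)) (items : List String) (out : List (List String)) : Prop := out = merge_equivalences_alt eq_star items
instance (eq_star : List (List Bool)) (items : List String) (out : List (List String)) : Decidable (Spec_merge_equivalences eq_star items out) := by unfold Spec_merge_equivalences; infer_instance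

-- ===== CLAIM (what is proved, stated in full; the proofs are below) =====
def Claim_equal_merge_equivalences : Prop := ∀ (eq_star : List (List Bool)) (items : List String), Dom_merge_equivalences eq_star items → Pre_merge_equivalences eq_star items → Spec_merge_equivalences eq_star items (merge_equivalences eq_star items)

-- ===== LEMMAS AND PROOFS =====
def stepP (p : List Nat) (x : Nat) : Nat := p.getD x x

def rootP (p : List Nat) (x : Nat) : Nat := (stepP p)^[p.length] x

def CertP (p : List Nat) (h : Nat → Nat) : Prop :=
  ∀ x, x < p.length → stepP p x ≠ x → h (stepP p x) < h x

def RngP (p : List Nat) : Prop := ∀ x, x < p.length → stepP p x < p.length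

def GoodP (p : List Nat) (h : Nat → Nat) : Prop := CertP p h ∧ RngP p

theorem stepP_out (p : List Nat) (x : Nat) (hx : p.length ≤ x) : stepP p x = x := by
  simp [stepP, List.getD, List.getElem?_eq_none hx]

theorem rootP_fix (p : List Nat) (x : Nat) (hx : stepP p x = x) : rootP p x = x :=
  Function.iterate_fixed hx _

theorem iter_lt (p : List Nat) (hR : ∀ x, x < p.length → stepP p x < p.length) (x : Nat) (hx : x < p.length) :
    ∀ k, (stepP p)^[k] x < p.length := by
  intro k; induction k with
  | zero => simpa
  | succ k ih => rw [Function.iterate_succ_apply']; exact hR _ ih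

theorem stepP_set (p : List Nat) (v w y : Nat) (hv : v < p.length) :
    stepP (p.set v w) y = if y = v then w else stepP p y := by
  unfold stepP
  rcases eq_or_ne y v with rfl | hne
  · simp [List.getD, List.getElem?_set_self, hv]
  · simp [List.getD, List.getElem?_set_ne (by omega : v ≠ y), hne]

theorem root_stab (p : List Nat) (h : Nat → Nat) (hG : GoodP p h) (x : Nat) :
    stepP p (rootP p x) = rootP p x := by
  obtain ⟨hC, hR⟩ := hG
  by_contra hne
  -- no iterate up to n is a fixpoint
  have hnofix : ∀ i, i ≤ p.length → stepP p ((stepP p)^[i] x) ≠ (stepP p)^[i] x := by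
    intro i hi hfix
    apply hne
    have : rootP p x = (stepP p)^[i] x := by
      unfold rootP
      have : p.length = (p.length - i) + i := by omega
      rw [this, Function.iterate_add_apply, Function.iterate_fixed hfix]
    rw [this]; exact hfix
  -- hence x < length (else x itself is a fixpoint)
  have hx : x < p.length := by
    by_contra hge
    exact hnofix 0 (Nat.zero_le _) (by simpa using stepP_out p x (by omega))
  have hiter : ∀ k, (stepP p)^[k] x < p.length := iter_lt p hR x hx
  -- h strictly decreases along iterates
  have hdec : ∀ i, i < p.length → h ((stepP p)^[i+1] x) < h ((stepP p)^[i] x) := by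
    intro i hi
    rw [Function.iterate_succ_apply']
    exact hC _ (hiter i) (hnofix i (by omega))
  have hchain : ∀ i j, i < j → j ≤ p.length → h ((stepP p)^[j] x) < h ((stepP p)^[i] x) := by
    intro i j hij hj
    induction j with
    | zero => omega
    | succ j ih =>
      rcases Nat.lt_or_ge i j with hlt | hge
      · exact lt_trans (hdec j (by omega)) (ih hlt (by omega))
      · have : i = j := by omega
        subst this; exact hdec i (by omega)
  -- injection Fin (n+1) → Fin n
  have hinj : Function.Injective (fun i : Fin (p.length + 1) =>
      (⟨(stepP p)^[i.1] x, hiter i.1⟩ : Fin p.length)) := by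
    intro i j hij
    simp only [Fin.mk.injEq] at hij
    by_contra hne2
    rcases Nat.lt_or_ge i.1 j.1 with hlt | hge
    · have := hchain i.1 j.1 hlt (by omega); rw [hij] at this; omega
    · have hlt2 : j.1 < i.1 := by
        rcases Nat.lt_or_ge j.1 i.1 with h2 | h2
        · exact h2
        · exact absurd (Fin.ext (by omega)) hne2
      have := hchain j.1 i.1 hlt2 (by omega); rw [hij] at this; omega
  have := Fintype.card_le_of_injective _ hinj
  simp at this

theorem root_step (p : List Nat) (h : Nat → Nat) (hG : GoodP p h) (x : Nat) :
    rootP p (stepP p x) = rootP p x := by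
  unfold rootP
  rw [← Function.iterate_succ_apply, Function.iterate_succ_apply']
  exact root_stab p h hG x

theorem set_halve_spec (p : List Nat) (h : Nat → Nat) (v : Nat) (hG : GoodP p h)
    (hv : v < p.length) (hnf : stepP p v ≠ v) :
    GoodP (p.set v (stepP p (stepP p v))) h ∧
      ∀ y, rootP (p.set v (stepP p (stepP p v))) y = rootP p y := by
  obtain ⟨hC, hR⟩ := hG
  set w := stepP p (stepP p v) with hw
  have hwlt : w < p.length := hR _ (hR v hv)
  have hhw : h w < h v := by
    have h1 : h (stepP p v) < h v := hC v hv hnf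
    rcases eq_or_ne (stepP p (stepP p v)) (stepP p v) with he | hne2
    · rw [hw, he]; exact h1
    · exact lt_trans (hC _ (hR v hv) hne2) h1
  have hlen : (p.set v w).length = p.length := by simp
  have hstep : ∀ y, stepP (p.set v w) y = if y = v then w else stepP p y :=
    fun y => stepP_set p v w y hv
  have hC' : CertP (p.set v w) h := by
    intro y hy hne2
    rw [hstep] at hne2 ⊢
    rcases eq_or_ne y v with rfl | hyv
    · simpa using hhw
    · simp only [if_neg hyv] at hne2 ⊢
      exact hC y (by omega) hne2
  have hR' : RngP (p.set v w) := by
    intro y hy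
    rw [hlen] at hy ⊢; rw [hstep]
    rcases eq_or_ne y v with rfl | hyv
    · simpa using hwlt
    · simpa [hyv] using hR y hy
  have hG' : GoodP (p.set v w) h := ⟨hC', hR'⟩
  refine ⟨hG', ?_⟩
  have key : ∀ m y, h y < m → rootP (p.set v w) y = rootP p y := by
    intro m
    induction m with
    | zero => omega
    | succ m ih =>
      intro y hym
      rcases Nat.lt_or_ge y p.length with hy | hy
      · rcases eq_or_ne y v with hyv | hyv
        · have e1 : rootP (p.set v w) y = rootP (p.set v w) w := by
            rw [← root_step _ h hG' y, hstep, if_pos hyv]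
          have hmw : h w < m := by rw [hyv] at hym; omega
          rw [e1, ih w hmw, hw, root_step p h ⟨hC, hR⟩, root_step p h ⟨hC, hR⟩, hyv]
        · rcases eq_or_ne (stepP p y) y with hf | hnf2
          · rw [rootP_fix p y hf, rootP_fix]
            rw [hstep, if_neg hyv]; exact hf
          · have e1 : rootP (p.set v w) y = rootP (p.set v w) (stepP p y) := by
              rw [← root_step _ h hG' y, hstep, if_neg hyv]
            rw [e1, ih (stepP p y) (by have := hC y hy hnf2; omega),
              root_step p h ⟨hC, hR⟩]
      · have hf : stepP p y = y := stepP_out p y hy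
        have hf' : stepP (p.set v w) y = y := by rw [hstep, if_neg (by omega)]; exact hf
        rw [rootP_fix _ y hf', rootP_fix _ y hf]
  exact fun y => key (h y + 1) y (by omega)

theorem set_root_spec (p : List Nat) (h : Nat → Nat) (ra rb : Nat) (hG : GoodP p h)
    (hra : stepP p ra = ra) (hrb : stepP p rb = rb)
    (hra' : ra < p.length) (hrb' : rb < p.length) (hne : ra ≠ rb) :
    GoodP (p.set rb ra) (fun y => if rootP p y = rb then h y + h ra + 1 else h y) ∧
      ∀ y, rootP (p.set rb ra) y = if rootP p y = rb then ra else rootP p y := by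
  obtain ⟨hC, hR⟩ := hG
  have hstep : ∀ y, stepP (p.set rb ra) y = if y = rb then ra else stepP p y :=
    fun y => stepP_set p rb ra y hrb'
  have hroot_ra : rootP p ra = ra := rootP_fix p ra hra
  have hroot_rb : rootP p rb = rb := rootP_fix p rb hrb
  have hC' : CertP (p.set rb ra) (fun y => if rootP p y = rb then h y + h ra + 1 else h y) := by
    intro y hy hne2
    simp only [List.length_set] at hy
    rw [hstep] at hne2 ⊢
    rcases eq_or_ne y rb with hyv | hyv
    · rw [if_pos hyv] at hne2 ⊢
      subst hyv
      simp only [hroot_ra, hroot_rb, if_neg hne, if_pos rfl, if_true, eq_self_iff_true]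
      simp [hne]
    · rw [if_neg hyv] at hne2 ⊢
      have hd := hC y hy hne2
      have hrs : rootP p (stepP p y) = rootP p y := root_step p h ⟨hC, hR⟩ y
      simp only [hrs]
      split_ifs <;> omega
  have hR' : RngP (p.set rb ra) := by
    intro y hy
    simp only [List.length_set] at hy ⊢
    rw [hstep]
    rcases eq_or_ne y rb with hyv | hyv
    · rw [if_pos hyv]; exact hra'
    · rw [if_neg hyv]; exact hR y hy
  have hG' : GoodP (p.set rb ra) (fun y => if rootP p y = rb then h y + h ra + 1 else h y) :=
    ⟨hC', hR'⟩
  refine ⟨hG', ?_⟩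
  have key : ∀ m y, h y < m → rootP (p.set rb ra) y = if rootP p y = rb then ra else rootP p y := by
    intro m
    induction m with
    | zero => omega
    | succ m ih =>
      intro y hym
      rcases Nat.lt_or_ge y p.length with hy | hy
      · rcases eq_or_ne y rb with hyv | hyv
        · subst hyv
          rw [hroot_rb, if_pos rfl]
          have e1 : rootP (p.set y ra) y = rootP (p.set y ra) ra := by
            rw [← root_step _ _ hG' y, hstep, if_pos rfl]
          rw [e1, rootP_fix]
          rw [hstep, if_neg hne]; exact hra
        · rcases eq_or_ne (stepP p y) y with hf | hnf2
          · have hry : rootP p y = y := rootP_fix p y hf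
            rw [hry, if_neg hyv, rootP_fix]
            rw [hstep, if_neg hyv]; exact hf
          · have e1 : rootP (p.set rb ra) y = rootP (p.set rb ra) (stepP p y) := by
              rw [← root_step _ _ hG' y, hstep, if_neg hyv]
            rw [e1, ih (stepP p y) (by have := hC y hy hnf2; omega),
              root_step p h ⟨hC, hR⟩]
      · have hf : stepP p y = y := stepP_out p y hy
        have hyv : y ≠ rb := by omega
        rw [rootP_fix p y hf, if_neg hyv, rootP_fix]
        rw [hstep, if_neg hyv]; exact hf
  exact fun y => key (h y + 1) y (by omega)

theorem findA_succ (p : List Nat) (x fuel : Nat) :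
    findA p x (fuel+1) =
      if p.getD x x = x then (p, x)
      else findA (p.set x (p.getD (p.getD x x) (p.getD x x)))
        ((p.set x (p.getD (p.getD x x) (p.getD x x))).getD x x) fuel := rfl

theorem findA_spec (n : Nat) (h : Nat → Nat) :
    ∀ (fuel : Nat) (p : List Nat) (x : Nat) (S : Finset Nat),
      p.length = n → GoodP p h → x < n → x ∉ S →
      (∀ s ∈ S, s < n ∧ h x < h s) → n ≤ fuel + S.card →
      (findA p x fuel).1.length = n ∧ GoodP (findA p x fuel).1 h ∧
        (∀ y, rootP (findA p x fuel).1 y = rootP p y) ∧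
        (findA p x fuel).2 = rootP p x := by
  intro fuel
  induction fuel with
  | zero =>
    intro p x S hlen hG hx hxS hS hcard
    exfalso
    have hsub : S ⊆ Finset.range n := fun s hs => Finset.mem_range.2 (hS s hs).1
    have hSeq : S = Finset.range n :=
      Finset.eq_of_subset_of_card_le hsub (by simpa using hcard)
    exact hxS (hSeq ▸ Finset.mem_range.2 hx)
  | succ fuel ih =>
    intro p x S hlen hG hx hxS hS hcard
    rw [findA_succ]
    by_cases hfix : p.getD x x = x
    · rw [if_pos hfix]
      exact ⟨hlen, hG, fun y => rfl, (rootP_fix p x hfix).symm⟩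
    · rw [if_neg hfix]
      have hxlen : x < p.length := by omega
      have hnf : stepP p x ≠ x := hfix
      have hw : p.getD (p.getD x x) (p.getD x x) = stepP p (stepP p x) := rfl
      obtain ⟨hG', hroots'⟩ := set_halve_spec p h x hG hxlen hnf
      rw [hw]
      have hx' : (p.set x (stepP p (stepP p x))).getD x x = stepP p (stepP p x) := by
        have := stepP_set p x (stepP p (stepP p x)) x hxlen
        simpa [stepP] using this
      rw [hx']
      have hwlt : stepP p (stepP p x) < n := by
        have := hG.2 _ (hG.2 x hxlen); omega
      have hhw : h (stepP p (stepP p x)) < h x := by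
        have h1 : h (stepP p x) < h x := hG.1 x hxlen hnf
        rcases eq_or_ne (stepP p (stepP p x)) (stepP p x) with he | hne2
        · rw [he]; exact h1
        · exact lt_trans (hG.1 _ (hG.2 x hxlen) hne2) h1
      have hmem : stepP p (stepP p x) ∉ insert x S := by
        intro hmem
        rcases Finset.mem_insert.1 hmem with heq | hmem2
        · rw [heq] at hhw; omega
        · have := (hS _ hmem2).2; omega
      have hS' : ∀ s ∈ insert x S, s < n ∧ h (stepP p (stepP p x)) < h s := by
        intro s hs
        rcases Finset.mem_insert.1 hs with rfl | hs2
        · exact ⟨hx, hhw⟩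
        · exact ⟨(hS s hs2).1, lt_trans hhw (hS s hs2).2⟩
      have hcard' : n ≤ fuel + (insert x S).card := by
        rw [Finset.card_insert_of_notMem hxS]; omega
      obtain ⟨l1, g1, r1, v1⟩ := ih (p.set x (stepP p (stepP p x)))
        (stepP p (stepP p x)) (insert x S) (by simpa using hlen) hG' hwlt hmem hS' hcard'
      refine ⟨l1, g1, fun y => (r1 y).trans (hroots' y), ?_⟩
      rw [v1, hroots', root_step p h hG, root_step p h hG]

theorem root_lt (p : List Nat) (hR : RngP p) (x : Nat) (hx : x < p.length) :
    rootP p x < p.length := iter_lt p hR x hx _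

theorem uniteA_spec (p : List Nat) (h : Nat → Nat) (a b : Nat) (hG : GoodP p h)
    (ha : a < p.length) (hb : b < p.length) :
    (uniteA p a b).length = p.length ∧ (∃ h', GoodP (uniteA p a b) h') ∧
      ∀ y, rootP (uniteA p a b) y =
        if rootP p y = rootP p b then rootP p a else rootP p y := by
  obtain ⟨l1, g1, r1, v1⟩ := findA_spec p.length h (p.length + 1) p a ∅ rfl hG ha
    (Finset.notMem_empty a) (by simp) (by simp)
  obtain ⟨l2, g2, r2, v2⟩ := findA_spec p.length h
    ((findA p a (p.length + 1)).1.length + 1) (findA p a (p.length + 1)).1 b ∅ l1 g1 hb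
    (Finset.notMem_empty b) (by simp) (by simp [l1])
  have hu : uniteA p a b =
      if (findA p a (p.length + 1)).2 ≠
          (findA (findA p a (p.length + 1)).1 b ((findA p a (p.length + 1)).1.length + 1)).2
      then (findA (findA p a (p.length + 1)).1 b ((findA p a (p.length + 1)).1.length + 1)).1.set
          (findA (findA p a (p.length + 1)).1 b ((findA p a (p.length + 1)).1.length + 1)).2
          (findA p a (p.length + 1)).2
      else (findA (findA p a (p.length + 1)).1 b ((findA p a (p.length + 1)).1.length + 1)).1 := rfl
  have hrb2 : rootP (findA p a (p.length + 1)).1 b = rootP p b := r1 b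
  rw [hu, v1, v2, hrb2]
  by_cases hne : rootP p a = rootP p b
  · rw [if_neg (not_not_intro hne)]
    refine ⟨l2, ⟨h, g2⟩, ?_⟩
    intro y
    rw [r2 y, r1 y]
    split_ifs with hc
    · rw [hc, ← hne]
    · rfl
  · rw [if_pos hne]
    have hfa : stepP (findA (findA p a (p.length + 1)).1 b ((findA p a (p.length + 1)).1.length + 1)).1 (rootP p a) = rootP p a := by
      have e : rootP (findA (findA p a (p.length + 1)).1 b ((findA p a (p.length + 1)).1.length + 1)).1 a = rootP p a := (r2 a).trans (r1 a)
      rw [← e]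
      exact root_stab _ h g2 a
    have hfb : stepP (findA (findA p a (p.length + 1)).1 b ((findA p a (p.length + 1)).1.length + 1)).1 (rootP p b) = rootP p b := by
      have e : rootP (findA (findA p a (p.length + 1)).1 b ((findA p a (p.length + 1)).1.length + 1)).1 b = rootP p b := (r2 b).trans (r1 b)
      rw [← e]
      exact root_stab _ h g2 b
    have hlta : rootP p a < (findA (findA p a (p.length + 1)).1 b ((findA p a (p.length + 1)).1.length + 1)).1.length := by
      rw [l2]; exact root_lt p hG.2 a ha
    have hltb : rootP p b < (findA (findA p a (p.length + 1)).1 b ((findA p a (p.length + 1)).1.length + 1)).1.length := by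
      rw [l2]; exact root_lt p hG.2 b hb
    obtain ⟨hg', hr'⟩ := set_root_spec _ h (rootP p a) (rootP p b) g2 hfa hfb hlta hltb hne
    refine ⟨by simp [l2], ⟨_, hg'⟩, ?_⟩
    intro y
    rw [hr' y, (r2 y).trans (r1 y)]

theorem foldl_rel {α β γ : Type} (R : α → β → Prop) (f : α → γ → α) (g : β → γ → β) :
    ∀ (l : List γ) (a : α) (b : β), R a b →
      (∀ x y c, c ∈ l → R x y → R (f x c) (g y c)) →
      R (l.foldl f a) (l.foldl g b) := by
  intro l
  induction l with
  | nil => intro a b hab _; simpa using hab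
  | cons c t ih =>
    intro a b hab hstep
    simp only [List.foldl_cons]
    exact ih (f a c) (g b c) (hstep a b c List.mem_cons_self hab)
      (fun x y c' hc' => hstep x y c' (List.mem_cons_of_mem _ hc'))

def InvPL (n : Nat) (p ls : List Nat) : Prop :=
  p.length = n ∧ ls.length = n ∧ (∃ h, GoodP p h) ∧
    ∀ x, x < n → ls.getD x 0 = rootP p x

theorem pair_step (n : Nat) (p ls : List Nat) (i j : Nat) (hI : InvPL n p ls)
    (hi : i < n) (hj : j < n) :
    InvPL n (uniteA p i j)
      (if ls.getD i 0 ≠ ls.getD j 0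
       then ls.map (fun l => if l = ls.getD j 0 then ls.getD i 0 else l)
       else ls) := by
  obtain ⟨hpl, hll, ⟨h, hG⟩, hroot⟩ := hI
  obtain ⟨hul, hug, huroot⟩ := uniteA_spec p h i j hG (by omega) (by omega)
  have hri : ls.getD i 0 = rootP p i := hroot i hi
  have hrj : ls.getD j 0 = rootP p j := hroot j hj
  refine ⟨hul.trans hpl, ?_, hug, ?_⟩
  · split_ifs <;> simp [hll]
  · intro x hx
    have hx' : x < ls.length := by omega
    rw [huroot x]
    by_cases hab : ls.getD i 0 ≠ ls.getD j 0
    · rw [if_pos hab]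
      have e1 : (ls.map (fun l => if l = ls.getD j 0 then ls.getD i 0 else l)).getD x 0
          = if ls.getD x 0 = ls.getD j 0 then ls.getD i 0 else ls.getD x 0 := by
        rw [List.getD_eq_getElem _ _ (by simpa using hx'), List.getElem_map,
          List.getD_eq_getElem _ _ hx']
      rw [e1, hroot x hx, hri, hrj]
    · rw [if_neg hab]
      push_neg at hab
      have hij : rootP p i = rootP p j := by rw [← hri, ← hrj, hab]
      rw [hroot x hx]
      split_ifs with hc
      · rw [hc, hij]
      · rfl

theorem stepP_range (n x : Nat) (hx : x < n) : stepP (List.range n) x = x := by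
  simp [stepP, List.getD, List.getElem?_range, hx]

theorem InvPL_init (n : Nat) : InvPL n (List.range n) (List.range n) := by
  refine ⟨by simp, by simp, ⟨fun _ => 0, fun x hx hne => ?_, fun x hx => ?_⟩, fun x hx => ?_⟩
  · exact absurd (stepP_range n x (by simpa using hx)) hne
  · rw [stepP_range n x (by simpa using hx)]; simpa using hx
  · rw [rootP_fix _ x (stepP_range n x hx)]
    simp [List.getD, List.getElem?_range, hx]

theorem pairloop_inv (eq_star : List (List Bool)) (items : List String) :
    InvPL items.length
      ((List.range items.length).foldl (fun p i =>
        (List.range' (i+1) (items.length - (i+1))).foldl (fun p j =>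
          if (eq_star.getD i []).getD j false && (eq_star.getD j []).getD i false
          then uniteA p i j else p) p) (List.range items.length))
      ((List.range items.length).foldl (fun ls i =>
        (List.range' (i+1) (items.length - (i+1))).foldl (fun ls j =>
          if (eq_star.getD i []).getD j false && (eq_star.getD j []).getD i false
          then
            if ls.getD i 0 ≠ ls.getD j 0
            then ls.map (fun l => if l = ls.getD j 0 then ls.getD i 0 else l)
            else ls
          else ls) ls) (List.range items.length)) := by
  apply foldl_rel (InvPL items.length) _ _ _ _ _ (InvPL_init items.length)
  intro p ls i hi hR
  apply foldl_rel (InvPL items.length) _ _ _ _ _ hR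
  intro p' ls' j hj hR'
  have hi' : i < items.length := List.mem_range.1 hi
  have hj' : j < items.length := by
    have := List.mem_range'_1.1 hj; omega
  by_cases hc : ((eq_star.getD i []).getD j false && (eq_star.getD j []).getD i false) = true
  · rw [if_pos hc, if_pos hc]
    exact pair_step items.length p' ls' i j hR' hi' hj'
  · rw [if_neg hc, if_neg hc]
    exact hR'

theorem tail_eq (items : List String) (PA LS : List Nat)
    (hinv : InvPL items.length PA LS) :
    PySem.List.sorted
      (((List.range items.length).foldl
          (fun (st : List Nat × PySem.Dict Nat (List String)) i =>
            ((findA st.1 i (st.1.length + 1)).1,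
              st.2.modify (findA st.1 i (st.1.length + 1)).2 [] (· ++ [items.getD i ""])))
          (PA, PySem.Dict.empty)).2.values.map
        (fun v => PySem.List.sorted v (fun x => x) false))
      (fun g => g.getD 0 "") false
    = PySem.List.sorted
      (((List.range items.length).foldl
          (fun (d : PySem.Dict Nat (List String)) idx =>
            d.modify (LS.getD idx 0) [] (· ++ [items.getD idx ""]))
          PySem.Dict.empty).values.map
        (fun v => PySem.List.sorted v (fun x => x) false))
      (fun g => g.getD 0 "") false := by
  obtain ⟨hpl, hll, ⟨h, hG⟩, hroot⟩ := hinv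
  have hdict := foldl_rel
    (fun (st : List Nat × PySem.Dict Nat (List String)) (d : PySem.Dict Nat (List String)) =>
      st.2 = d ∧ st.1.length = items.length ∧ GoodP st.1 h ∧
        ∀ x, x < items.length → LS.getD x 0 = rootP st.1 x)
    (fun (st : List Nat × PySem.Dict Nat (List String)) i =>
      ((findA st.1 i (st.1.length + 1)).1,
        st.2.modify (findA st.1 i (st.1.length + 1)).2 [] (· ++ [items.getD i ""])))
    (fun (d : PySem.Dict Nat (List String)) idx =>
      d.modify (LS.getD idx 0) [] (· ++ [items.getD idx ""]))
    (List.range items.length) (PA, PySem.Dict.empty) PySem.Dict.empty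
    ⟨rfl, hpl, hG, hroot⟩ ?_
  · rw [hdict.1]
  · intro st d i hi hR
    obtain ⟨hd, hl, hg, hr⟩ := hR
    have hi' : i < items.length := List.mem_range.1 hi
    obtain ⟨l1, g1, rr, vv⟩ := findA_spec items.length h (st.1.length + 1) st.1 i ∅ hl hg hi'
      (Finset.notMem_empty i) (by simp) (by simp [hl])
    refine ⟨?_, l1, g1, fun x hx => (hr x hx).trans (rr x).symm⟩
    show st.2.modify (findA st.1 i (st.1.length + 1)).2 [] (· ++ [items.getD i ""])
        = d.modify (LS.getD i 0) [] (· ++ [items.getD i ""])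
    rw [hd, vv, hr i hi']

theorem main_lemma (eq_star : List (List Bool)) (items : List String) :
    merge_equivalences eq_star items = merge_equivalences_alt eq_star items := by
  unfold merge_equivalences merge_equivalences_alt
  exact tail_eq items _ _ (pairloop_inv eq_star items)

-- ===== VERDICT (by name: the statement is the Claim_ definition above) =====
theorem merge_equivalences_spec : Claim_equal_merge_equivalences := by
  intro eq_star items _ _
  exact main_lemma eq_star items
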